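-- pv_equiv track=rewrite | github.com/FeonixY/AllThatStax | allthatstax/legalities.py | extract_legalities
-- ===== SOURCE A (Python) =====
-- from typing import Dict, Iterable, Mapping, Sequence
--
-- LEGALITY_ORDER: Sequence[str] = (
--     "standard",
--     "pioneer",
--     "modern",
--     "legacy",
--     "pauper",
--     "vintage",
--     "commander",
--     "duel_commander",
-- )
--
-- def _normalise_key(value: str) -> str:
--     return value.strip().lower()
--
-- def _candidate_source_keys(target: str) -> Iterable[str]:
--     """Yield possible source keys for a canonical legality entry.
--
--     Scryfall uses ``"duel"`` for the Duel Commander legality, while the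
--     application historically refers to the format as ``"duel_commander"``.
--     Rather than hard-coding a manual mapping, we derive aliases based on common
--     naming conventions so new formats following the same pattern automatically
--     work.
--     """
--
--     yield target
--     # Treat ``foo_commander`` as a potential alias of ``foo`` because Scryfall
--     # omits the suffix for Duel Commander.
--     if target.endswith("_commander"):
--         yield target[: -len("_commander")]
--
-- def extract_legalities(raw: Mapping[str, object]) -> Dict[str, str]:
--     """Normalise Scryfall legality data into the canonical format order."""
--
--     if not raw:
--         return {}
--
--     normalised = {}
--     for key, value in raw.items():
--         normalised_key = _normalise_key(str(key))
--         if normalised_key not in normalised: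
--             normalised[normalised_key] = str(value)
--
--     cleaned: Dict[str, str] = {}
--     for target in LEGALITY_ORDER:
--         for candidate in _candidate_source_keys(target):
--             normalised_key = _normalise_key(candidate)
--             if normalised_key in normalised:
--                 cleaned[target] = normalised[normalised_key]
--                 break
--     return cleaned
-- ===== SOURCE B (Python) =====
-- LEGALITY_ORDER = (
--     "standard",
--     "pioneer",
--     "modern",
--     "legacy",
--     "pauper",
--     "vintage",
--     "commander",
--     "duel_commander",
-- )
--
-- # Built once: normalized alias key -> canonical target ("duel" -> "duel_commander").
-- _ALIAS = {t[: -len("_commander")]: t for t in LEGALITY_ORDER if t.endswith("_commander")}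
--
--
-- def extract_legalities(raw):
--     """Single pass over raw: each key feeds at most one target with a priority
--     (0 = direct key, 1 = alias); keep the lowest-priority, earliest-seen value
--     per target, then emit targets in canonical order."""
--     best = {}
--     for key, value in raw.items():
--         nk = str(key).strip().lower()
--         hit = None
--         if nk in LEGALITY_ORDER:
--             hit = (nk, 0)
--         elif nk in _ALIAS:
--             hit = (_ALIAS[nk], 1)
--         if hit is not None:
--             t, p = hit
--             cur = best.get(t)
--             if cur is None or p < cur[0]:
--                 best[t] = (p, str(value))
--     return {t: best[t][1] for t in LEGALITY_ORDER if t in best}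
-- ===== Notes on version B (the rewrite author's own statement) =====
-- stated objective: alternative
-- what changed: Instead of A's two-phase scheme (build a normalised dict of all raw items, then for each target try its candidate keys in a nested loop), B precomputes the alias map once and makes a single pass over the raw items, keeping per target the lowest-priority (direct beats alias), earliest-seen value, then emits targets in canonical order.
import Mathlib
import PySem

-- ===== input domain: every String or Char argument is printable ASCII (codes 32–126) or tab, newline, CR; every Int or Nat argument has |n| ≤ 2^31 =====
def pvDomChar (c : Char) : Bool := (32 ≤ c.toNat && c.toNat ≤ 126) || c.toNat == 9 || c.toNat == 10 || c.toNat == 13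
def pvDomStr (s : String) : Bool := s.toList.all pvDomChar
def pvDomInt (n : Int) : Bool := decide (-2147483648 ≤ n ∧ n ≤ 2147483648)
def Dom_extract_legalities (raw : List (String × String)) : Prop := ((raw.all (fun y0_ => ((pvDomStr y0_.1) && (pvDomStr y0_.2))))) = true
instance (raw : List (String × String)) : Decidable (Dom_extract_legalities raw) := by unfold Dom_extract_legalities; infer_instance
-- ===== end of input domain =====

-- B replaces A's two-phase scheme (normalised dict of all items, then a nested candidate
-- loop per target) by one pass over the items keeping a per-target (priority, value) best
-- entry; objective: alternative (same asymptotic cost, no intermediate normalised dict).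

-- ===== PORT A =====
def LEGALITY_ORDER : List String :=
  ["standard", "pioneer", "modern", "legacy", "pauper", "vintage", "commander", "duel_commander"]

-- _normalise_key
def normaliseKey (s : String) : String := PySem.Str.lower (PySem.Str.strip s)

-- _candidate_source_keys (the generator, as the list it yields)
def candidateSourceKeys (t : String) : List String :=
  t :: (if PySem.Str.endswith t "_commander"
        then [PySem.Str.slice t none (some (-10))]   -- t[:-len("_commander")]
        else [])

-- body of A's first loop: normalised[nk] = str(value) unless nk is already present
def aNormStep (d : PySem.Dict String String) (kv : String × String) : PySem.Dict String String :=
  let nk := normaliseKey kv.1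
  if d.contains nk then d else d.insert nk kv.2

-- body of A's second loop: the first candidate present in `normalised` wins (the `break`)
def aCleanStep (normalised : PySem.Dict String String)
    (cleaned : PySem.Dict String String) (t : String) : PySem.Dict String String :=
  match (candidateSourceKeys t).findSome? (fun c => normalised.get? (normaliseKey c)) with
  | some v => cleaned.insert t v
  | none => cleaned

def extract_legalities (raw : List (String × String)) : List (String × String) :=
  if raw = [] then []
  else
    (LEGALITY_ORDER.foldl (aCleanStep (raw.foldl aNormStep PySem.Dict.empty))
      PySem.Dict.empty).items

-- ===== PORT B =====
-- _ALIAS = {t[:-len("_commander")]: t for t in LEGALITY_ORDER if t.endswith("_commander")}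
def aliasMap : PySem.Dict String String :=
  LEGALITY_ORDER.foldl (fun d t =>
    if PySem.Str.endswith t "_commander"
    then d.insert (PySem.Str.slice t none (some (-10))) t
    else d) PySem.Dict.empty

-- best[t] = (p, value) if that improves on the current entry (strictly lower priority)
def bUpdate (best : PySem.Dict String (Int × String)) (t : String) (p : Int) (w : String) :
    PySem.Dict String (Int × String) :=
  match best.get? t with
  | none => best.insert t (p, w)
  | some cur => if p < cur.1 then best.insert t (p, w) else best

-- body of B's single pass: normalise the key, find its (target, priority), update best
def bStep (best : PySem.Dict String (Int × String)) (kv : String × String) :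
    PySem.Dict String (Int × String) :=
  let nk := PySem.Str.lower (PySem.Str.strip kv.1)
  let hit : Option (String × Int) :=
    if nk ∈ LEGALITY_ORDER then some (nk, 0)
    else match aliasMap.get? nk with
      | some t => some (t, 1)
      | none => none
  match hit with
  | none => best
  | some tp => bUpdate best tp.1 tp.2 kv.2

-- {t: best[t][1] for t in LEGALITY_ORDER if t in best}
def bOutStep (best : PySem.Dict String (Int × String))
    (out : PySem.Dict String String) (t : String) : PySem.Dict String String :=
  match best.get? t with
  | some c => out.insert t c.2
  | none => out

def extract_legalities_alt (raw : List (String × String)) : List (String × String) :=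
  (LEGALITY_ORDER.foldl (bOutStep (raw.foldl bStep PySem.Dict.empty)) PySem.Dict.empty).items

-- ===== PRECONDITION & SPEC =====
def Spec_extract_legalities (raw : List (String × String)) (out : List (String × String)) : Prop := out = extract_legalities_alt raw
instance (raw : List (String × String)) (out : List (String × String)) : Decidable (Spec_extract_legalities raw out) := by unfold Spec_extract_legalities; infer_instance

-- ===== CLAIM (what is proved, stated in full; the proofs are below) =====
def Claim_equal_extract_legalities : Prop := ∀ (raw : List (String × String)), Dom_extract_legalities raw → Spec_extract_legalities raw (extract_legalities raw)

-- ===== LEMMAS AND PROOFS =====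

-- first value in raw whose normalised key is `key`
def firstN : List (String × String) → String → Option String
  | [], _ => none
  | kv :: rest, key => if normaliseKey kv.1 = key then some kv.2 else firstN rest key

-- B's priority merge rule
def mergeB : Option (Int × String) → Option (Int × String) → Option (Int × String)
  | none, n => n
  | some o, none => some o
  | some o, some n => if n.1 < o.1 then some n else some o

-- what B's best entry for target t holds after scanning raw ("duel_commander" is the
-- single aliased target of the concrete LEGALITY_ORDER)
def bval (raw : List (String × String)) (t : String) : Option (Int × String) :=
  ((firstN raw t).map (fun v => ((0:Int), v))).or
    (if t = "duel_commander" then (firstN raw "duel").map (fun v => ((1:Int), v)) else none)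

lemma aliasMap_eq : aliasMap = (PySem.Dict.empty : PySem.Dict String String).insert "duel" "duel_commander" := by
  decide

lemma duel_not_mem : "duel" ∉ LEGALITY_ORDER := by decide

lemma firstN_cons_self {kv : String × String} {rest : List (String × String)} {key : String}
    (h : normaliseKey kv.1 = key) : firstN (kv :: rest) key = some kv.2 := by
  simp [firstN, h]

lemma firstN_cons_ne {kv : String × String} {rest : List (String × String)} {key : String}
    (h : normaliseKey kv.1 ≠ key) : firstN (kv :: rest) key = firstN rest key := by
  simp [firstN, h]

lemma bval_nil (t : String) : bval [] t = none := by
  simp [bval, firstN]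

lemma bval_cons_ne {kv : String × String} {rest : List (String × String)} {t : String}
    (h1 : normaliseKey kv.1 ≠ t) (h2 : t = "duel_commander" → normaliseKey kv.1 ≠ "duel") :
    bval (kv :: rest) t = bval rest t := by
  unfold bval
  rw [firstN_cons_ne h1]
  by_cases ht : t = "duel_commander"
  · simp only [if_pos ht, firstN_cons_ne (h2 ht)]
  · simp only [if_neg ht]

lemma bval_cons_self {kv : String × String} {rest : List (String × String)} {t : String}
    (h : normaliseKey kv.1 = t) : bval (kv :: rest) t = some (0, kv.2) := by
  unfold bval
  rw [firstN_cons_self h]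
  simp

lemma bval_prio_nonneg (raw : List (String × String)) (t : String) :
    ∀ p, bval raw t = some p → 0 ≤ p.1 := by
  intro p hp
  unfold bval at hp
  cases hf : firstN raw t with
  | some v =>
    rw [hf] at hp
    have h' : some ((0:Int), v) = some p := hp
    cases h'
    norm_num
  | none =>
    rw [hf] at hp
    by_cases ht : t = "duel_commander"
    · rw [if_pos ht] at hp
      cases hg : firstN raw "duel" with
      | none => rw [hg] at hp; simp at hp
      | some u =>
        rw [hg] at hp
        have h' : some ((1:Int), u) = some p := hp
        cases h'
        norm_num
    · rw [if_neg ht] at hp; simp at hp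

lemma mergeB_none_left (x : Option (Int × String)) : mergeB none x = x := by cases x <;> rfl

lemma mergeB_none_right (x : Option (Int × String)) : mergeB x none = x := by cases x <;> rfl

-- once a priority-0 entry is merged in, later candidates of priority ≥ 0 never replace it
lemma mergeB_absorb0 (x y : Option (Int × String)) (w : String)
    (hy : ∀ p, y = some p → 0 ≤ p.1) :
    mergeB (mergeB x (some (0, w))) y = mergeB x (some (0, w)) := by
  cases y with
  | none => exact mergeB_none_right _
  | some p =>
    have hp := hy p rfl
    cases x with
    | none => simp only [mergeB]; rw [if_neg (by omega)]
    | some o =>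
      by_cases h1 : (0:Int) < o.1
      · simp only [mergeB, if_pos h1]; rw [if_neg (by omega)]
      · simp only [mergeB, if_neg h1]; rw [if_neg (by omega)]

lemma mergeB_10 (x : Option (Int × String)) (w v : String) :
    mergeB (mergeB x (some (1, w))) (some (0, v)) = mergeB x (some (0, v)) := by
  cases x with
  | none => simp only [mergeB]; rw [if_pos (by norm_num)]
  | some o =>
    by_cases h1 : (1:Int) < o.1
    · simp only [mergeB, if_pos h1]
      rw [if_pos (by norm_num), if_pos (by omega)]
    · simp only [mergeB, if_neg h1]

lemma mergeB_11 (x : Option (Int × String)) (w u : String) :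
    mergeB (mergeB x (some (1, w))) (some (1, u)) = mergeB x (some (1, w)) := by
  cases x with
  | none => simp only [mergeB]; rw [if_neg (by norm_num)]
  | some o =>
    by_cases h1 : (1:Int) < o.1
    · simp only [mergeB, if_pos h1]; rw [if_neg (by norm_num)]
    · simp only [mergeB, if_neg h1]

lemma bUpdate_get_self (b : PySem.Dict String (Int × String)) (k : String) (p : Int) (w : String) :
    (bUpdate b k p w).get? k = mergeB (b.get? k) (some (p, w)) := by
  unfold bUpdate
  cases h : b.get? k with
  | none => simp [mergeB, PySem.Dict.get?_insert_self]
  | some cur =>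
    by_cases h0 : p < cur.1
    · simp [mergeB, h0, PySem.Dict.get?_insert_self]
    · simp [mergeB, h0, h]

lemma bUpdate_get_ne (b : PySem.Dict String (Int × String)) (k t : String) (p : Int) (w : String)
    (h : t ≠ k) : (bUpdate b k p w).get? t = b.get? t := by
  unfold bUpdate
  cases hb : b.get? k with
  | none => rw [PySem.Dict.get?_insert]; simp [h]
  | some cur =>
    by_cases h0 : p < cur.1
    · simp only [h0, if_true]; rw [PySem.Dict.get?_insert]; simp [h]
    · simp [h0]

lemma findSome_one (f : String → Option String) (t : String) : List.findSome? f [t] = f t := by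
  simp only [List.findSome?]; cases f t <;> rfl

lemma findSome_two (f : String → Option String) (t a : String) :
    List.findSome? f [t, a] = ((f t).or (f a)) := by
  simp only [List.findSome?]; cases f t <;> cases f a <;> rfl

-- A's first phase: the normalised dict looks up the first matching raw item
lemma A_norm (raw : List (String × String)) :
    ∀ (d : PySem.Dict String String) (k : String),
      (raw.foldl aNormStep d).get? k = (d.get? k).or (firstN raw k) := by
  induction raw with
  | nil => intro d k; simp [firstN]
  | cons kv rest ih =>
    intro d k
    simp only [List.foldl_cons]
    by_cases hc : d.contains (normaliseKey kv.1)
    · rw [show aNormStep d kv = d by simp [aNormStep, hc], ih, firstN]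
      by_cases hk : normaliseKey kv.1 = k
      · subst hk
        have : (d.get? (normaliseKey kv.1)).isSome := by
          rw [← PySem.Dict.contains_eq_isSome_get?]; exact hc
        obtain ⟨v, hv⟩ := Option.isSome_iff_exists.mp this
        simp [hv]
      · simp [hk]
    · rw [show aNormStep d kv = d.insert (normaliseKey kv.1) kv.2 by simp [aNormStep, hc],
          ih, PySem.Dict.get?_insert, firstN]
      by_cases hk : k = normaliseKey kv.1
      · subst hk
        have hnone : d.get? (normaliseKey kv.1) = none :=
          (PySem.Dict.get?_eq_none_iff_contains d _).mpr (by simpa using hc)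
        simp [hnone]
      · simp [hk, Ne.symm hk]

-- B's pass: the best entry for a target merges the old entry with bval of the suffix
lemma B_best (raw : List (String × String)) :
    ∀ (best : PySem.Dict String (Int × String)) (t : String), t ∈ LEGALITY_ORDER →
      (raw.foldl bStep best).get? t = mergeB (best.get? t) (bval raw t) := by
  induction raw with
  | nil => intro best t _; simp only [List.foldl_nil, bval_nil, mergeB_none_right]
  | cons kv rest ih =>
    intro best t ht
    simp only [List.foldl_cons]
    have hnorm : normaliseKey kv.1 = PySem.Str.lower (PySem.Str.strip kv.1) := rfl
    by_cases hmem : PySem.Str.lower (PySem.Str.strip kv.1) ∈ LEGALITY_ORDER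
    · -- direct hit with priority 0
      rw [show bStep best kv = bUpdate best (PySem.Str.lower (PySem.Str.strip kv.1)) 0 kv.2 by
            simp [bStep, hmem]]
      by_cases heq : PySem.Str.lower (PySem.Str.strip kv.1) = t
      · have heqn : normaliseKey kv.1 = t := hnorm.trans heq
        rw [heq, ih _ t ht, bUpdate_get_self, bval_cons_self heqn,
            mergeB_absorb0 _ _ _ (bval_prio_nonneg rest t)]
      · rw [ih _ t ht, bUpdate_get_ne _ _ _ _ _ (Ne.symm heq),
            bval_cons_ne (hnorm ▸ heq)]
        intro ht' h
        rw [hnorm] at h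
        exact duel_not_mem (h ▸ hmem)
    · cases hal : aliasMap.get? (PySem.Str.lower (PySem.Str.strip kv.1)) with
      | none =>
        -- no hit: nothing changes
        rw [show bStep best kv = best by simp [bStep, hmem, hal]]
        have hnkd : PySem.Str.lower (PySem.Str.strip kv.1) ≠ "duel" := by
          intro h
          rw [aliasMap_eq, h, PySem.Dict.get?_insert, if_pos rfl] at hal
          exact Option.some_ne_none _ hal
        rw [ih _ t ht, bval_cons_ne (by rw [hnorm]; intro h; exact hmem (h ▸ ht))]
        intro _ h
        rw [hnorm] at h
        exact hnkd h
      | some t' =>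
        -- alias hit: nk = "duel", t' = "duel_commander", priority 1
        have hd : PySem.Str.lower (PySem.Str.strip kv.1) = "duel" ∧ t' = "duel_commander" := by
          rw [aliasMap_eq, PySem.Dict.get?_insert] at hal
          by_cases hdq : PySem.Str.lower (PySem.Str.strip kv.1) = "duel"
          · rw [if_pos hdq] at hal
            exact ⟨hdq, (Option.some.inj hal).symm⟩
          · rw [if_neg hdq,
                show (PySem.Dict.empty : PySem.Dict String String).get?
                  (PySem.Str.lower (PySem.Str.strip kv.1)) = none from rfl] at hal
            exact absurd hal.symm (Option.some_ne_none _)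
        obtain ⟨hd1, hd2⟩ := hd
        rw [show bStep best kv = bUpdate best t' 1 kv.2 by simp [bStep, hmem, hal]]
        subst hd2
        by_cases heq : t = "duel_commander"
        · subst heq
          rw [ih _ _ ht, bUpdate_get_self]
          have hne : normaliseKey kv.1 ≠ "duel_commander" := by rw [hnorm, hd1]; decide
          have hself : normaliseKey kv.1 = "duel" := by rw [hnorm, hd1]
          cases hf : firstN rest "duel_commander" with
          | some v =>
            have e1 : bval (kv :: rest) "duel_commander" = some (0, v) := by
              unfold bval; rw [firstN_cons_ne hne, hf]; simp
            have e2 : bval rest "duel_commander" = some (0, v) := by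
              unfold bval; rw [hf]; simp
            rw [e1, e2, mergeB_10]
          | none =>
            have e1 : bval (kv :: rest) "duel_commander" = some (1, kv.2) := by
              unfold bval
              rw [firstN_cons_ne hne, hf, if_pos rfl, firstN_cons_self hself]
              simp
            cases hg : firstN rest "duel" with
            | none =>
              have e2 : bval rest "duel_commander" = none := by
                unfold bval; rw [hf, if_pos rfl, hg]; simp
              rw [e1, e2, mergeB_none_right]
            | some u =>
              have e2 : bval rest "duel_commander" = some (1, u) := by
                unfold bval; rw [hf, if_pos rfl, hg]; simp
              rw [e1, e2, mergeB_11]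
        · rw [ih _ t ht, bUpdate_get_ne _ _ _ _ _ heq,
              bval_cons_ne (by rw [hnorm, hd1]; intro h; exact duel_not_mem (h ▸ ht))]
          intro h
          exact absurd h heq

-- the per-target values of the two output loops agree
lemma pointwise (raw : List (String × String)) (t : String) (ht : t ∈ LEGALITY_ORDER) :
    (candidateSourceKeys t).findSome?
      (fun c => (raw.foldl aNormStep PySem.Dict.empty).get? (normaliseKey c))
    = ((raw.foldl bStep PySem.Dict.empty).get? t).map (·.2) := by
  have hB := B_best raw PySem.Dict.empty t ht
  rw [show (PySem.Dict.empty : PySem.Dict String (Int × String)).get? t = none from rfl,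
      mergeB_none_left] at hB
  have hA : ∀ k, (raw.foldl aNormStep PySem.Dict.empty).get? k = firstN raw k := by
    intro k
    rw [A_norm, show (PySem.Dict.empty : PySem.Dict String String).get? k = none from rfl]
    rfl
  rw [hB]
  simp only [LEGALITY_ORDER] at ht
  fin_cases ht
  case _ => -- standard
    rw [show candidateSourceKeys "standard" = ["standard"] from rfl, findSome_one]
    simp only [hA, show normaliseKey "standard" = "standard" from rfl]
    unfold bval
    rw [if_neg (by decide)]
    cases firstN raw "standard" <;> rfl
  case _ =>
    rw [show candidateSourceKeys "pioneer" = ["pioneer"] from rfl, findSome_one]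
    simp only [hA, show normaliseKey "pioneer" = "pioneer" from rfl]
    unfold bval
    rw [if_neg (by decide)]
    cases firstN raw "pioneer" <;> rfl
  case _ =>
    rw [show candidateSourceKeys "modern" = ["modern"] from rfl, findSome_one]
    simp only [hA, show normaliseKey "modern" = "modern" from rfl]
    unfold bval
    rw [if_neg (by decide)]
    cases firstN raw "modern" <;> rfl
  case _ =>
    rw [show candidateSourceKeys "legacy" = ["legacy"] from rfl, findSome_one]
    simp only [hA, show normaliseKey "legacy" = "legacy" from rfl]
    unfold bval
    rw [if_neg (by decide)]
    cases firstN raw "legacy" <;> rfl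
  case _ =>
    rw [show candidateSourceKeys "pauper" = ["pauper"] from rfl, findSome_one]
    simp only [hA, show normaliseKey "pauper" = "pauper" from rfl]
    unfold bval
    rw [if_neg (by decide)]
    cases firstN raw "pauper" <;> rfl
  case _ =>
    rw [show candidateSourceKeys "vintage" = ["vintage"] from rfl, findSome_one]
    simp only [hA, show normaliseKey "vintage" = "vintage" from rfl]
    unfold bval
    rw [if_neg (by decide)]
    cases firstN raw "vintage" <;> rfl
  case _ =>
    rw [show candidateSourceKeys "commander" = ["commander"] from rfl, findSome_one]
    simp only [hA, show normaliseKey "commander" = "commander" from rfl]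
    unfold bval
    rw [if_neg (by decide)]
    cases firstN raw "commander" <;> rfl
  case _ =>
    rw [show candidateSourceKeys "duel_commander" = ["duel_commander", "duel"] from rfl,
        findSome_two]
    simp only [hA, show normaliseKey "duel_commander" = "duel_commander" from rfl,
      show normaliseKey "duel" = "duel" from rfl]
    unfold bval
    rw [if_pos rfl]
    cases firstN raw "duel_commander" <;> cases firstN raw "duel" <;> rfl

theorem pv_main (raw : List (String × String)) :
    extract_legalities raw = extract_legalities_alt raw := by
  by_cases hr : raw = []
  · subst hr; rfl
  · unfold extract_legalities extract_legalities_alt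
    rw [if_neg hr]
    congr 1
    apply PySem.List.foldl_congr_mem
    intro acc t ht
    unfold aCleanStep bOutStep
    rw [pointwise raw t ht]
    cases (raw.foldl bStep PySem.Dict.empty).get? t <;> rfl

-- ===== VERDICT (by name: the statement is the Claim_ definition above) =====
theorem extract_legalities_spec : Claim_equal_extract_legalities := by
  intro raw _
  unfold Spec_extract_legalities
  exact pv_main raw
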